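-- pv_equiv track=rewrite | github.com/pypi-data/pypi-mirror-402 | packages/wy-qcos/wy_qcos-1.0.1-py3-none-any.whl/wy_qcos/transpiler/cmss/wirecut/utils.py | compute_measure_combian
-- ===== SOURCE A (Python) =====
-- import itertools
--
-- def compute_measure_combian(meas):
--     """Generate possible measurement basis variants.
--
--     Args:
--         meas: Measuring the ground state
--
--     Returns:
--         List of possible measured ground states
--     """
--     # If there is no I, return the original measured ground state directly
--     if all(basis != "I" for basis in meas):
--         return [meas]
--
--     # Handling cases involving I
--     basis_options = []
--     for basis in meas:
--         if basis != "I":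
--             basis_options.append([basis])
--         else:
--             basis_options.append(["I", "Z"])
--
--     # Generate all possible combinations
--     return list(itertools.product(*basis_options))
-- ===== SOURCE B (Python) =====
-- def compute_measure_combian(meas):
--     """Generate possible measurement basis variants.
--
--     Counts the 'I' positions (k of them) and decodes each counter value in
--     range(2**k) into one variant: scanning meas from the right, each 'I'
--     consumes the counter's next low bit (0 -> 'I', 1 -> 'Z'), so the leftmost
--     'I' takes the most significant bit and variants come out in the same
--     order as the Cartesian-product enumeration.
--     """
--     if all(basis != "I" for basis in meas):
--         return [meas]
--     k = sum(1 for basis in meas if basis == "I")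
--     results = []
--     for m in range(2 ** k):
--         row = []
--         r = m
--         for basis in reversed(meas):
--             if basis == "I":
--                 row.append("I" if r % 2 == 0 else "Z")
--                 r //= 2
--             else:
--                 row.append(basis)
--         row.reverse()
--         results.append(tuple(row))
--     return results
-- ===== Notes on version B (the rewrite author's own statement) =====
-- stated objective: alternative
-- what changed: Instead of building per-position option lists and taking itertools.product, B counts the k 'I' positions and decodes each integer 0..2^k-1 bit by bit (right-to-left scan with % 2 and //= 2) into one variant, never materialising option lists.
import Mathlib
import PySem

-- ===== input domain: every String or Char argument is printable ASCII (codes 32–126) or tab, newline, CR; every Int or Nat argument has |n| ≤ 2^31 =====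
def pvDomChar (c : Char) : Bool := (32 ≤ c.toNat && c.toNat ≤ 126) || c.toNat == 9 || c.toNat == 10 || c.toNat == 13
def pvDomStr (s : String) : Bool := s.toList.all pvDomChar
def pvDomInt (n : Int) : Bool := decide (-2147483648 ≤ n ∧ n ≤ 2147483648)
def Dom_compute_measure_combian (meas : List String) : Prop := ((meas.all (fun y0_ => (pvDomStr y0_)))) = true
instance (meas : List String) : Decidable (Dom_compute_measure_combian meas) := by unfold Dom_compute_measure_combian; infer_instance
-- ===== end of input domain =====

-- B replaces itertools.product over per-position option lists by bit-decoding the integers 0..2^k-1 (k = number of 'I's); alternative algorithm, same cost.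

-- ===== PORT A =====
-- itertools.product over the option lists, first factor varies slowest (Python's order)
def pyProductStr : List (List String) → List (List String)
  | [] => [[]]
  | os :: rest => os.flatMap (fun o => (pyProductStr rest).map (fun t => o :: t))

-- literal port of A: guard, loop appending basis options, then product
def compute_measure_combian (meas : List String) : List (List String) :=
  if meas.all (fun basis => basis != "I") then [meas]
  else
    let basis_options := meas.foldl
      (fun acc basis => acc ++ [if basis != "I" then [basis] else ["I", "Z"]]) []
    pyProductStr basis_options

-- ===== PORT B =====
-- the body of B's inner loop over reversed(meas): each 'I' consumes the counter's low bit
def pvStep (st : List String × Int) (basis : String) : List String × Int :=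
  if basis == "I" then
    (st.1 ++ [if PySem.Int.mod st.2 2 = 0 then "I" else "Z"], PySem.Int.floordiv st.2 2)
  else (st.1 ++ [basis], st.2)

-- decode counter m into one variant: scan reversed(meas), then reverse the row
def pvRowOf (meas : List String) (m : Int) : List String :=
  (meas.reverse.foldl pvStep ([], m)).1.reverse

-- port of B: count the 'I's, decode each counter value in range(2**k)
def compute_measure_combian_alt (meas : List String) : List (List String) :=
  if meas.all (fun basis => basis != "I") then [meas]
  else
    let k := meas.countP (fun basis => basis == "I")
    (PySem.List.pyRange 0 ((2 : Int) ^ k) 1).map (fun m => pvRowOf meas m)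

-- ===== PRECONDITION & SPEC =====
def Spec_compute_measure_combian (meas : List String) (out : List (List String)) : Prop := out = compute_measure_combian_alt meas
instance (meas : List String) (out : List (List String)) : Decidable (Spec_compute_measure_combian meas out) := by unfold Spec_compute_measure_combian; infer_instance

-- ===== CLAIM =====
def Claim_equal_compute_measure_combian : Prop := ∀ (meas : List String), Dom_compute_measure_combian meas → Spec_compute_measure_combian meas (compute_measure_combian meas)

-- ===== LEMMAS AND PROOFS =====

def pvAxis (basis : String) : List String := if basis == "I" then ["I", "Z"] else [basis]

theorem foldl_options (xs : List String) (acc : List (List String)) :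
    xs.foldl (fun acc basis => acc ++ [if basis != "I" then [basis] else ["I", "Z"]]) acc
      = acc ++ xs.map pvAxis := by
  induction xs generalizing acc with
  | nil => simp
  | cons x xs ih =>
    have hx : (if x != "I" then [x] else ["I", "Z"]) = pvAxis x := by
      unfold pvAxis
      by_cases hxe : x = "I" <;> simp [hxe]
    simp only [List.foldl_cons, List.map_cons, ih, hx, List.append_assoc, List.singleton_append]

-- the counter after scanning xs (reversed) is n shifted right by the number of 'I's in xs
theorem snd_foldl_pvStep (xs : List String) (acc : List String) (n : Nat) :
    (xs.reverse.foldl pvStep (acc, (n : Int))).2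
      = ((n / 2 ^ (xs.countP (fun s => s == "I")) : Nat) : Int) := by
  induction xs generalizing acc with
  | nil => simp
  | cons c rs ih =>
    simp only [List.reverse_cons, List.foldl_append, List.foldl_cons, List.foldl_nil]
    by_cases hc : c = "I"
    · have hsnd := ih acc
      have hfd : PySem.Int.floordiv ((n / 2 ^ (rs.countP (fun s => s == "I")) : Nat) : Int) 2
          = ((n / 2 ^ (rs.countP (fun s => s == "I")) / 2 : Nat) : Int) := by
        exact_mod_cast PySem.Int.floordiv_natCast (n / 2 ^ (rs.countP (fun s => s == "I"))) 2
      simp only [pvStep, hc, beq_self_eq_true, if_true, List.countP_cons, hsnd, hfd]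
      norm_num [Nat.div_div_eq_div_mul, pow_succ]
    · simp only [pvStep, beq_iff_eq, hc, if_false, List.countP_cons, ih acc]
      simp

theorem pvRowOf_nil (m : Int) : pvRowOf [] m = [] := by
  simp [pvRowOf]

theorem pvRowOf_cons (b : String) (rest : List String) (n : Nat) :
    pvRowOf (b :: rest) (n : Int)
      = (if b = "I"
           then (if n / 2 ^ (rest.countP (fun s => s == "I")) % 2 = 0 then "I" else "Z")
           else b) :: pvRowOf rest (n : Int) := by
  unfold pvRowOf
  simp only [List.reverse_cons, List.foldl_append, List.foldl_cons, List.foldl_nil]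
  by_cases hb : b = "I"
  · have hmod : PySem.Int.mod ((n / 2 ^ (rest.countP (fun s => s == "I")) : Nat) : Int) 2
        = ((n / 2 ^ (rest.countP (fun s => s == "I")) % 2 : Nat) : Int) := by
      exact_mod_cast PySem.Int.mod_natCast (n / 2 ^ (rest.countP (fun s => s == "I"))) 2
    simp only [pvStep, hb, beq_self_eq_true, if_true, List.reverse_append,
      List.reverse_cons, List.reverse_nil, List.nil_append, List.singleton_append,
      snd_foldl_pvStep rest [] n, hmod, Nat.cast_eq_zero]
  · simp [pvStep, hb]

-- decoding only reads the low bits: adding multiples of 2^(count of 'I') changes nothing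
theorem pvRowOf_period (meas : List String) (n q : Nat) :
    pvRowOf meas ((n + 2 ^ (meas.countP (fun s => s == "I")) * q : Nat) : Int)
      = pvRowOf meas (n : Int) := by
  induction meas generalizing q with
  | nil => simp [pvRowOf_nil]
  | cons b rest ih =>
    rw [pvRowOf_cons, pvRowOf_cons]
    by_cases hb : b = "I"
    · simp only [List.countP_cons, hb, beq_self_eq_true, if_true]
      have hpos : 0 < 2 ^ (rest.countP (fun s => s == "I")) := Nat.two_pow_pos _
      have hsplit : 2 ^ (rest.countP (fun s => s == "I") + 1) * q
          = 2 ^ (rest.countP (fun s => s == "I")) * (2 * q) := by ring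
      rw [hsplit, ih (2 * q)]
      have hdiv : (n + 2 ^ (rest.countP (fun s => s == "I")) * (2 * q))
          / 2 ^ (rest.countP (fun s => s == "I"))
          = n / 2 ^ (rest.countP (fun s => s == "I")) + 2 * q :=
        Nat.add_mul_div_left n (2 * q) hpos
      have hmod : (n / 2 ^ (rest.countP (fun s => s == "I")) + 2 * q) % 2
          = n / 2 ^ (rest.countP (fun s => s == "I")) % 2 := by omega
      rw [hdiv, hmod]
    · simp only [List.countP_cons, beq_iff_eq, hb, if_false, add_zero, ih q]

theorem decode_eq_product (meas : List String) :
    (List.range (2 ^ (meas.countP (fun s => s == "I")))).map (fun n : Nat => pvRowOf meas (n : Int))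
      = pyProductStr (meas.map pvAxis) := by
  induction meas with
  | nil => simp [pvRowOf_nil, pyProductStr]
  | cons b rest ih =>
    by_cases hb : b = "I"
    · have hc : (b :: rest).countP (fun s => s == "I")
          = rest.countP (fun s => s == "I") + 1 := by simp [hb]
      rw [hc]
      have hsum : 2 ^ (rest.countP (fun s => s == "I") + 1)
          = 2 ^ (rest.countP (fun s => s == "I")) + 2 ^ (rest.countP (fun s => s == "I")) := by
        ring
      rw [hsum, List.range_add, List.map_append, List.map_map]
      have h1 : (List.range (2 ^ (rest.countP (fun s => s == "I")))).map
            (fun n : Nat => pvRowOf (b :: rest) (n : Int))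
          = (pyProductStr (rest.map pvAxis)).map (fun t => "I" :: t) := by
        rw [← ih, List.map_map]
        refine List.map_congr_left ?_
        intro n hn
        rw [List.mem_range] at hn
        simp only [Function.comp]
        rw [pvRowOf_cons, if_pos hb, Nat.div_eq_of_lt hn]
        simp
      have h2 : (List.range (2 ^ (rest.countP (fun s => s == "I")))).map
            ((fun n : Nat => pvRowOf (b :: rest) (n : Int)) ∘
              fun i => 2 ^ (rest.countP (fun s => s == "I")) + i)
          = (pyProductStr (rest.map pvAxis)).map (fun t => "Z" :: t) := by
        rw [← ih, List.map_map]
        refine List.map_congr_left ?_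
        intro n hn
        rw [List.mem_range] at hn
        simp only [Function.comp]
        have harg : 2 ^ (rest.countP (fun s => s == "I")) + n
            = n + 2 ^ (rest.countP (fun s => s == "I")) * 1 := by ring
        rw [harg, pvRowOf_cons, if_pos hb, pvRowOf_period rest n 1]
        have hdiv : (n + 2 ^ (rest.countP (fun s => s == "I")) * 1)
            / 2 ^ (rest.countP (fun s => s == "I")) = n / 2 ^ (rest.countP (fun s => s == "I")) + 1 :=
          Nat.add_mul_div_left n 1 (Nat.two_pow_pos _)
        rw [hdiv, Nat.div_eq_of_lt hn]
        simp
      rw [h1, h2]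
      simp [pyProductStr, pvAxis, hb]
    · have hc : (b :: rest).countP (fun s => s == "I")
          = rest.countP (fun s => s == "I") := by simp [hb]
      rw [hc]
      have h1 : (List.range (2 ^ (rest.countP (fun s => s == "I")))).map
            (fun n : Nat => pvRowOf (b :: rest) (n : Int))
          = (pyProductStr (rest.map pvAxis)).map (fun t => b :: t) := by
        rw [← ih, List.map_map]
        refine List.map_congr_left ?_
        intro n _
        simp only [Function.comp]
        rw [pvRowOf_cons, if_neg hb]
      rw [h1]
      simp [pyProductStr, pvAxis, hb]

-- ===== VERDICT =====
theorem compute_measure_combian_spec : Claim_equal_compute_measure_combian := by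
  intro meas _
  unfold Spec_compute_measure_combian compute_measure_combian compute_measure_combian_alt
  by_cases h : meas.all (fun basis => basis != "I")
  · simp [h]
  · simp only [h, Bool.false_eq_true, if_false]
    rw [foldl_options, List.nil_append]
    rw [show ((2:Int) ^ (meas.countP (fun basis => basis == "I")))
        = (((2 ^ (meas.countP (fun basis => basis == "I")) : Nat)) : Int) by push_cast; ring]
    rw [PySem.List.pyRange_zero_natCast, List.map_map]
    exact (decode_eq_product meas).symm
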